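-- pv_equiv track=rewrite | github.com/thom-heinrich/twinr | src/twinr/proactive/wakeword/matching.py | _looks_like_version_token
-- ===== SOURCE A (Python) =====
-- def _looks_like_version_token(value: str) -> bool:
--     token = value.strip().lower()
--     if not token:
--         return False
--     if token.startswith("v"):
--         token = token[1:]
--     separators = {".", "_", "-"}
--     parts: list[str] = []
--     current: list[str] = []
--     for char in token:
--         if char.isdigit():
--             current.append(char)
--             continue
--         if char in separators:
--             if not current:
--                 return False
--             parts.append("".join(current))
--             current = []
--             continue
--         return False
--     if current:
--         parts.append("".join(current))
--     return bool(parts)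
-- ===== SOURCE B (Python) =====
-- def _looks_like_version_token(value: str) -> bool:
--     token = value.strip().lower()
--     if not token:
--         return False
--     if token.startswith("v"):
--         token = token[1:]
--     parts = token.replace("_", ".").replace("-", ".").split(".")
--     if parts[-1] == "":
--         parts = parts[:-1]
--     return bool(parts) and all(p != "" and p.isdigit() for p in parts)
-- ===== Notes on version B (the rewrite author's own statement) =====
-- stated objective: simpler
-- what changed: Replaces A's per-character accumulator loop with early returns by normalising the underscore and hyphen separators to the dot separator, splitting once on it, trimming at most one trailing empty piece, and checking that every remaining piece is a nonempty digit run.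
import Mathlib
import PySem

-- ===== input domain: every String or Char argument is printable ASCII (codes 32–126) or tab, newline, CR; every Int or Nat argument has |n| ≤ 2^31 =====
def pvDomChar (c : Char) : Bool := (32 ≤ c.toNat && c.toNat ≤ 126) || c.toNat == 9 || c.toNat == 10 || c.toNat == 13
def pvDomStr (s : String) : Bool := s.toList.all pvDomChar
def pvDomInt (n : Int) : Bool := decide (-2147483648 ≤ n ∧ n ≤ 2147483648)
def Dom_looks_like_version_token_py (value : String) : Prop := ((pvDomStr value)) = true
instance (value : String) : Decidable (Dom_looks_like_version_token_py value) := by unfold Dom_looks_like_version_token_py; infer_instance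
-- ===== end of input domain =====

-- B keeps A's preprocessing but replaces the per-char accumulator loop by normalise-separators / split / check-parts (objective: simpler).

-- ===== PORT A =====
def pvSepA (c : Char) : Bool := c == '.' || c == '_' || c == '-'

-- the 'for char in token' loop with its early returns, state (parts, current)
def pvLoopA : List Char → List String → List Char → Bool
  | [], parts, current =>
      let parts := if current.isEmpty then parts else parts ++ [String.ofList current]
      !parts.isEmpty
  | c :: rest, parts, current =>
      if PySem.Chars.isdigit c then pvLoopA rest parts (current ++ [c])
      else if pvSepA c then
        if current.isEmpty then false
        else pvLoopA rest (parts ++ [String.ofList current]) []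
      else false

def looks_like_version_token_py (value : String) : Bool :=
  let token := PySem.Str.lower (PySem.Str.strip value)
  if token == "" then false
  else
    let token := if PySem.Str.startswith token "v" then PySem.Str.slice token (some 1) none else token
    pvLoopA token.toList [] []

-- ===== PORT B =====
def looks_like_version_token_py_alt (value : String) : Bool :=
  let token := PySem.Str.lower (PySem.Str.strip value)
  if token == "" then false
  else
    let token := if PySem.Str.startswith token "v" then PySem.Str.slice token (some 1) none else token
    let parts := PySem.Chars.splitOn
      (PySem.Chars.replace (PySem.Chars.replace token.toList ['_'] ['.']) ['-'] ['.']) ['.']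
    let parts := if parts.getLast? == some ([] : List Char) then parts.dropLast else parts
    !parts.isEmpty && parts.all (fun p => !p.isEmpty && PySem.Chars.strIsdigit p)

-- ===== PRECONDITION & SPEC =====
def Spec_looks_like_version_token_py (value : String) (out : Bool) : Prop := out = looks_like_version_token_py_alt value
instance (value : String) (out : Bool) : Decidable (Spec_looks_like_version_token_py value out) := by unfold Spec_looks_like_version_token_py; infer_instance

-- ===== CLAIM (what is proved, stated in full; the proofs are below) =====
def Claim_equal_looks_like_version_token_py : Prop := ∀ (value : String), Dom_looks_like_version_token_py value → Spec_looks_like_version_token_py value (looks_like_version_token_py value)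

-- ===== LEMMAS AND PROOFS =====

-- A's loop as a two-state machine: pvSt true = "inside a digit run", pvSt false = "just after a separator"
def pvSt : Bool → List Char → Bool
  | _, [] => true
  | inPart, c :: t =>
      if PySem.Chars.isdigit c then pvSt true t
      else if pvSepA c then inPart && pvSt false t
      else false

-- split a char list on a single separator char (pure recursion)
def pvSplitP (d : Char) : List Char → List (List Char)
  | [] => [[]]
  | c :: t =>
      if c == d then [] :: pvSplitP d t
      else match pvSplitP d t with
        | [] => [[c]]
        | h :: r => (c :: h) :: r

-- split on the separator CLASS
def pvSplitSep : List Char → List (List Char)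
  | [] => [[]]
  | c :: t =>
      if pvSepA c then [] :: pvSplitSep t
      else match pvSplitSep t with
        | [] => [[c]]
        | h :: r => (c :: h) :: r

-- validity of the parts after the head part: interior parts nonempty digits, last part digits (may be empty)
def pvRestOK : List (List Char) → Bool
  | [] => true
  | [p] => p.all PySem.Chars.isdigit
  | p :: q :: r => (!p.isEmpty && p.all PySem.Chars.isdigit) && pvRestOK (q :: r)

def pvChk (parts : List (List Char)) : Bool :=
  let parts := if parts.getLast? == some ([] : List Char) then parts.dropLast else parts
  !parts.isEmpty && parts.all (fun p => !p.isEmpty && PySem.Chars.strIsdigit p)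

theorem pvSplitP_ne_nil (d : Char) (l : List Char) : pvSplitP d l ≠ [] := by
  cases l with
  | nil => simp [pvSplitP]
  | cons c t =>
      simp only [pvSplitP]
      split
      · simp
      · split <;> simp_all

theorem pvSplitSep_ne_nil (l : List Char) : pvSplitSep l ≠ [] := by
  cases l with
  | nil => simp [pvSplitSep]
  | cons c t =>
      simp only [pvSplitSep]
      split
      · simp
      · split <;> simp_all

theorem pvReplaceGo (o n : Char) (l : List Char) : ∀ (fuel : Nat) (acc : List Char), l.length ≤ fuel →
    PySem.Chars.replace.go [o] [n] fuel l acc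
      = acc.reverse ++ l.map (fun c => if c == o then n else c) := by
  induction l with
  | nil =>
      intro fuel acc _
      cases fuel <;> simp [PySem.Chars.replace.go]
  | cons c t ih =>
      intro fuel acc hf
      cases fuel with
      | zero => simp at hf
      | succ f =>
          simp only [PySem.Chars.replace.go, List.isPrefixOf]
          by_cases hc : c = o
          · subst hc
            simp only [beq_self_eq_true, Bool.true_and, if_pos, List.length_singleton,
              List.drop_succ_cons, List.drop_zero, List.reverse_cons, List.reverse_nil,
              List.nil_append, List.singleton_append]
            rw [ih f (n :: acc) (by simp at hf; omega)]
            simp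
          · have : (o == c) = false := by simp [beq_eq_false_iff_ne]; exact fun h => hc h.symm
            simp only [this, Bool.false_and, if_neg Bool.false_ne_true]
            rw [ih f (c :: acc) (by simp at hf; omega)]
            simp [hc]

theorem pvReplaceChar (o n : Char) (l : List Char) :
    PySem.Chars.replace l [o] [n] = l.map (fun c => if c == o then n else c) := by
  simp [PySem.Chars.replace, pvReplaceGo o n l l.length [] (le_refl _)]

theorem pvSplitGo (d : Char) (l : List Char) : ∀ (fuel : Nat) (cur : List Char) (acc : List (List Char)),
    l.length ≤ fuel →
    PySem.Chars.splitOn.go [d] fuel l cur acc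
      = acc.reverse ++ ((cur.reverse ++ (pvSplitP d l).headI) :: (pvSplitP d l).tail) := by
  induction l with
  | nil =>
      intro fuel cur acc _
      cases fuel <;> simp [PySem.Chars.splitOn.go, pvSplitP]
  | cons c t ih =>
      intro fuel cur acc hf
      cases fuel with
      | zero => simp at hf
      | succ f =>
          simp only [PySem.Chars.splitOn.go, List.isPrefixOf]
          by_cases hc : c = d
          · subst hc
            simp only [beq_self_eq_true, Bool.true_and, if_pos, List.length_singleton,
              List.drop_succ_cons, List.drop_zero]
            rw [ih f [] (cur.reverse :: acc) (by simp at hf; omega)]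
            cases hsp : pvSplitP c t with
            | nil => exact absurd hsp (pvSplitP_ne_nil c t)
            | cons h r => simp [pvSplitP, hsp]
          · have hdc : (d == c) = false := by simp [beq_eq_false_iff_ne]; exact fun h => hc h.symm
            simp only [hdc, Bool.false_and, if_neg Bool.false_ne_true]
            rw [ih f (c :: cur) acc (by simp at hf; omega)]
            have hcd : (c == d) = false := by simp [beq_eq_false_iff_ne]; exact hc
            simp only [pvSplitP, hcd, if_neg Bool.false_ne_true]
            cases hsp : pvSplitP d t with
            | nil => exact absurd hsp (pvSplitP_ne_nil d t)
            | cons h r => simp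

theorem pvSplitOn_eq (d : Char) (l : List Char) :
    PySem.Chars.splitOn l [d] = pvSplitP d l := by
  simp only [PySem.Chars.splitOn]
  rw [pvSplitGo d l (l.length + 1) [] [] (by omega)]
  cases hsp : pvSplitP d l with
  | nil => exact absurd hsp (pvSplitP_ne_nil d l)
  | cons h r => simp

theorem pvSplitMap (l : List Char) :
    pvSplitP '.' ((l.map (fun c => if c == '_' then '.' else c)).map (fun c => if c == '-' then '.' else c))
      = pvSplitSep l := by
  induction l with
  | nil => simp [pvSplitP, pvSplitSep]
  | cons c t ih =>
      simp only [beq_iff_eq] at ih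
      simp only [List.map_cons, pvSplitSep]
      by_cases h1 : c = '_'
      · subst h1; simp [pvSplitP, pvSepA, ih, -List.map_map]
      · by_cases h2 : c = '-'
        · subst h2; simp [pvSplitP, pvSepA, ih, -List.map_map]
        · by_cases h3 : c = '.'
          · subst h3; simp [pvSplitP, pvSepA, ih, -List.map_map]
          · have hs : pvSepA c = false := by simp [pvSepA, h1, h2, h3]
            have e1 : (c == '_') = false := by simp [h1]
            have e2 : (c == '-') = false := by simp [h2]
            have e3 : (c == '.') = false := by simp [h3]
            simp only [e1, e2, if_neg Bool.false_ne_true, hs, pvSplitP, e3]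
            simp only [beq_iff_eq]
            rw [ih]

-- A's loop reduced to the state machine
theorem pvLoop_states (l : List Char) :
    (∀ (parts : List String) (cur : List Char), cur ≠ [] → pvLoopA l parts cur = pvSt true l) ∧
    (∀ (parts : List String), parts ≠ [] → pvLoopA l parts [] = pvSt false l) := by
  induction l with
  | nil =>
      refine ⟨fun parts cur hc => ?_, fun parts hp => ?_⟩ <;>
        simp_all [pvLoopA, pvSt, List.isEmpty_iff]
  | cons c t ih =>
      refine ⟨fun parts cur hc => ?_, fun parts hp => ?_⟩
      · simp only [pvLoopA, pvSt]
        split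
        · exact ih.1 parts (cur ++ [c]) (by simp)
        · split
          · simp_all [List.isEmpty_iff]
          · rfl
      · simp only [pvLoopA, pvSt]
        split
        · exact ih.1 parts [c] (by simp)
        · split
          · simp [List.isEmpty_nil]
          · rfl

-- state machine in terms of the split parts
theorem pvSt_split (l : List Char) :
    pvSt true l = ((pvSplitSep l).headI.all PySem.Chars.isdigit && pvRestOK (pvSplitSep l).tail) ∧
    pvSt false l = pvRestOK (pvSplitSep l) := by
  induction l with
  | nil => simp [pvSt, pvSplitSep, pvRestOK]
  | cons c t ih =>
      obtain ⟨ih1, ih2⟩ := ih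
      cases hsp : pvSplitSep t with
      | nil => exact absurd hsp (pvSplitSep_ne_nil t)
      | cons h r =>
          rw [hsp] at ih1 ih2
          by_cases hd : PySem.Chars.isdigit c = true
          · have hs : pvSepA c = false := by
              simp only [PySem.Chars.isdigit, Bool.and_eq_true, decide_eq_true_eq] at hd
              simp only [pvSepA, Bool.or_eq_false_iff, beq_eq_false_iff_ne, ne_eq]
              refine ⟨⟨fun h => ?_, fun h => ?_⟩, fun h => ?_⟩ <;> subst h <;> revert hd <;> decide
            constructor <;>
            · simp only [pvSt, pvSplitSep, hd, if_pos, hs, hsp]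
              simp only [if_neg Bool.false_ne_true]
              cases r with
              | nil => simp_all [pvRestOK]
              | cons q r' => simp_all [pvRestOK]
          · by_cases hs : pvSepA c = true
            · constructor <;>
              · simp only [pvSt, pvSplitSep, hd, hs, if_pos, if_neg Bool.false_ne_true, hsp]
                simp [pvRestOK, ih2]
            · constructor <;>
              · simp only [pvSt, pvSplitSep, hd, hs, if_neg Bool.false_ne_true, hsp]
                cases r with
                | nil => simp_all [pvRestOK]
                | cons q r' => simp_all [pvRestOK]
-- trimming one trailing empty then checking all = pvRestOK
theorem pvTrim_eq_rest (r : List (List Char)) (hr : r ≠ []) :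
    ((if r.getLast? == some ([] : List Char) then r.dropLast else r).all
        (fun p => !p.isEmpty && p.all PySem.Chars.isdigit)) = pvRestOK r := by
  induction r with
  | nil => exact absurd rfl hr
  | cons q r' ih =>
      cases r' with
      | nil =>
          by_cases hq : q = ([] : List Char)
          · simp [pvRestOK, hq]
          · simp [pvRestOK, hq, List.isEmpty_iff]
      | cons w r'' =>
          have h1 : (q :: w :: r'').getLast? = (w :: r'').getLast? := by
            simp [List.getLast?_cons_cons]
          have h2 : (q :: w :: r'').dropLast = q :: (w :: r'').dropLast := by
            simp [List.dropLast_cons_of_ne_nil]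
          rw [h1, h2]
          have := ih (by simp)
          simp only [pvRestOK]
          split
          · simp only [List.all_cons]
            rw [← this]; simp_all [PySem.Chars.strIsdigit]
          · simp only [List.all_cons]
            rw [← this]; simp_all [PySem.Chars.strIsdigit]

-- pvChk on a cons, in terms of pvRestOK
theorem pvChk_cons (p : List Char) (r : List (List Char)) :
    pvChk (p :: r) = ((!p.isEmpty && p.all PySem.Chars.isdigit) && pvRestOK r) := by
  cases r with
  | nil =>
      by_cases hp : p = ([] : List Char)
      · simp [pvChk, hp, pvRestOK]
      · cases p with
        | nil => exact absurd rfl hp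
        | cons a p' => simp [pvChk, pvRestOK, PySem.Chars.strIsdigit]
  | cons q r'' =>
      rw [← pvTrim_eq_rest (q :: r'') (List.cons_ne_nil q r'')]
      simp only [pvChk, List.getLast?_cons_cons, List.dropLast_cons_of_ne_nil (List.cons_ne_nil q r'')]
      split
      · cases p with
        | nil => simp [PySem.Chars.strIsdigit]
        | cons a p' => simp [PySem.Chars.strIsdigit, Bool.and_assoc]
      · cases p with
        | nil => simp [PySem.Chars.strIsdigit]
        | cons a p' => simp [PySem.Chars.strIsdigit, Bool.and_assoc]

-- the main list-level equivalence
theorem pvMain (l : List Char) : pvLoopA l [] [] = pvChk (pvSplitSep l) := by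
  cases l with
  | nil => simp [pvLoopA, pvSplitSep, pvChk]
  | cons c t =>
      cases hsp : pvSplitSep t with
      | nil => exact absurd hsp (pvSplitSep_ne_nil t)
      | cons h r =>
          by_cases hd : PySem.Chars.isdigit c = true
          · have hs : pvSepA c = false := by
              simp only [PySem.Chars.isdigit, Bool.and_eq_true, decide_eq_true_eq] at hd
              simp only [pvSepA, Bool.or_eq_false_iff, beq_eq_false_iff_ne, ne_eq]
              refine ⟨⟨fun h => ?_, fun h => ?_⟩, fun h => ?_⟩ <;> subst h <;> revert hd <;> decide
            have hl : pvLoopA (c :: t) [] [] = pvSt true t := by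
              simp only [pvLoopA, hd, if_pos]
              exact (pvLoop_states t).1 [] [c] (by simp)
            have hsp' : pvSplitSep (c :: t) = (c :: h) :: r := by
              simp only [pvSplitSep, hs, if_neg Bool.false_ne_true, hsp]
            rw [hl, (pvSt_split t).1, hsp, hsp', pvChk_cons]
            simp [hd]
          · by_cases hs : pvSepA c = true
            · have hl : pvLoopA (c :: t) [] [] = false := by
                simp [pvLoopA, hd, hs]
              have hsp' : pvSplitSep (c :: t) = [] :: h :: r := by
                simp only [pvSplitSep, hs, if_pos, hsp]
              rw [hl, hsp', pvChk_cons]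
              simp
            · have hl : pvLoopA (c :: t) [] [] = false := by
                simp [pvLoopA, hd, hs]
              have hsp' : pvSplitSep (c :: t) = (c :: h) :: r := by
                simp only [pvSplitSep, hs, if_neg Bool.false_ne_true, hsp]
              rw [hl, hsp', pvChk_cons]
              simp [hd]

-- B's parts pipeline is pvSplitSep
theorem pvPipeline (l : List Char) :
    PySem.Chars.splitOn (PySem.Chars.replace (PySem.Chars.replace l ['_'] ['.']) ['-'] ['.']) ['.']
      = pvSplitSep l := by
  rw [pvReplaceChar, pvReplaceChar, pvSplitOn_eq, pvSplitMap]

-- ===== VERDICT (by name: the statement is the Claim_ definition above) =====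
theorem looks_like_version_token_py_spec : Claim_equal_looks_like_version_token_py := by
  intro value _
  unfold Spec_looks_like_version_token_py
  unfold looks_like_version_token_py looks_like_version_token_py_alt
  simp only
  by_cases h : (PySem.Str.lower (PySem.Str.strip value) == "") = true
  · simp [h]
  · simp only [h, if_neg Bool.false_ne_true]
    rw [pvPipeline]
    exact pvMain _
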